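-- pv_equiv track=rewrite | github.com/Medeiros000/Estacio_estudo | Estudo_Python/Estacio/algoritmo_op_matrizes.py | OperacaoMatriz
-- ===== SOURCE A (Python) =====
-- def OperacaoMatriz(n):
--   A = [0] * n
--   i = 1
--   while i < n:
--     A[i] = 0
--     i += 1
--
--   for i in range(1, n):
--     for j in range(1, n):
--       A[i] += i * j
--   return A
-- ===== SOURCE B (Python) =====
-- def OperacaoMatriz(n):
--   S = (n - 1) * n // 2
--   return [i * S for i in range(n)]
-- ===== Notes on version B (the rewrite author's own statement) =====
-- stated objective: faster
-- what changed: Replaced the quadratic double loop accumulating A[i] += i*j by the closed form S=(n-1)*n//2 and a single comprehension A[i]=i*S.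
import Mathlib
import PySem

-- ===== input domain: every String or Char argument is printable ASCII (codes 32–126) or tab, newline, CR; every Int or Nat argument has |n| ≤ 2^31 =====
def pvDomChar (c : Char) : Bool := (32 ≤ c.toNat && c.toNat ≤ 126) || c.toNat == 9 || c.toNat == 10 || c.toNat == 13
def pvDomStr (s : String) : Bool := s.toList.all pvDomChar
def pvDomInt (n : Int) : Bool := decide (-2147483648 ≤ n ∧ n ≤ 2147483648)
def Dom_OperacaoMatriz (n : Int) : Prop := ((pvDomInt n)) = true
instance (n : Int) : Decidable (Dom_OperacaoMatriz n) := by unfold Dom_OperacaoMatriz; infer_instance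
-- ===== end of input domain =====

-- B replaces A's quadratic double accumulation loop by the closed form S=(n-1)*n//2 in one pass (objective: faster, asymptotic).

-- ===== PORT A =====
-- A = [0] * n ; while i < n: A[i] = 0 (the while counts i = 1,...,n-1, i.e. range(1,n));
-- then for i in range(1,n): for j in range(1,n): A[i] += i*j.
-- All indices i lie in [1,n) with len(A) = n, so the list writes/reads are always in range;
-- List.set / List.getD are exact for them.
def OperacaoMatriz (n : Int) : List Int :=
  let A := List.replicate n.toNat 0
  let A := (PySem.List.pyRange 1 n 1).foldl (fun acc i => acc.set i.toNat 0) A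
  (PySem.List.pyRange 1 n 1).foldl
    (fun acc i =>
      (PySem.List.pyRange 1 n 1).foldl
        (fun acc2 j => acc2.set i.toNat (acc2.getD i.toNat 0 + i * j)) acc)
    A

-- ===== PORT B =====
-- S = (n - 1) * n // 2 ; [i * S for i in range(n)]
def OperacaoMatriz_alt (n : Int) : List Int :=
  let S := PySem.Int.floordiv ((n - 1) * n) 2
  (PySem.List.pyRange 0 n 1).map (fun i => i * S)

-- ===== PRECONDITION & SPEC =====
def Spec_OperacaoMatriz (n : Int) (out : List Int) : Prop := out = OperacaoMatriz_alt n
instance (n : Int) (out : List Int) : Decidable (Spec_OperacaoMatriz n out) := by unfold Spec_OperacaoMatriz; infer_instance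

-- ===== CLAIM (what is proved, stated in full; the proofs are below) =====
def Claim_equal_OperacaoMatriz : Prop := ∀ (n : Int), Dom_OperacaoMatriz n → Spec_OperacaoMatriz n (OperacaoMatriz n)

-- ===== LEMMAS AND PROOFS =====

-- the while loop only rewrites zeros over zeros
theorem pv_while_noop (l : List Int) (m : Nat) :
    l.foldl (fun acc i => acc.set i.toNat 0) (List.replicate m (0:Int)) = List.replicate m 0 := by
  induction l with
  | nil => rfl
  | cons i t ih => simpa [List.set_replicate_self] using ih

-- inner loop: repeated A[k] += c*j over a list sums up
theorem pv_inner (c : Int) (k : Nat) (l : List Int) (L : List Int) :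
    l.foldl (fun acc2 j => acc2.set k (acc2.getD k 0 + c * j)) L
      = L.set k (L.getD k 0 + c * l.sum) := by
  induction l generalizing L with
  | nil =>
    simp only [List.foldl_nil, List.sum_nil, mul_zero, add_zero]
    by_cases h : k < L.length
    · rw [List.getD_eq_getElem L 0 h, List.set_getElem_self]
    · rw [List.set_eq_of_length_le (le_of_not_gt h)]
  | cons j t ih =>
    simp only [List.foldl_cons, ih]
    by_cases h : k < L.length
    · rw [List.set_set]
      have : (L.set k (L.getD k 0 + c * j)).getD k 0 = L.getD k 0 + c * j := by
        rw [List.getD_eq_getElem _ 0 (by simpa using h), List.getElem_set_self]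
      rw [this, List.sum_cons]; ring_nf
    · have hle : L.length ≤ k := le_of_not_gt h
      simp [List.set_eq_of_length_le, hle]

-- fold preserves length
theorem pv_len (l : List Int) (S : Int) (L : List Int) :
    (l.foldl (fun acc i => acc.set i.toNat (acc.getD i.toNat 0 + i * S)) L).length = L.length := by
  induction l generalizing L with
  | nil => rfl
  | cons i t ih => rw [List.foldl_cons, ih, List.length_set]

-- elementwise effect of the outer fold: each listed nonneg in-range index gets + i*S once
theorem pv_outer (S : Int) (l : List Int) (hl : l.Nodup) (hpos : ∀ i ∈ l, 0 ≤ i)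
    (L : List Int) (hrng : ∀ i ∈ l, i.toNat < L.length) (k : Nat) :
    (l.foldl (fun acc i => acc.set i.toNat (acc.getD i.toNat 0 + i * S)) L).getD k 0
      = if (k : Int) ∈ l then L.getD k 0 + (k : Int) * S else L.getD k 0 := by
  induction l generalizing L with
  | nil => simp
  | cons i t ih =>
    have hi0 : 0 ≤ i := hpos i (by simp)
    have hirng : i.toNat < L.length := hrng i (by simp)
    have hlen : (L.set i.toNat (L.getD i.toNat 0 + i * S)).length = L.length := by simp
    rw [List.foldl_cons,
        ih hl.of_cons (fun x hx => hpos x (by simp [hx]))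
          _ (fun x hx => by rw [hlen]; exact hrng x (by simp [hx]))]
    by_cases hk : (k : Int) = i
    · have hkt : (k : Int) ∉ t := by rw [hk]; exact (List.nodup_cons.mp hl).1
      have hki : i.toNat = k := by omega
      simp only [hkt, if_neg hkt, hki]
      rw [List.getD_eq_getElem _ 0 (by simpa [hki] using hirng), List.getElem_set_self]
      simp [hk, hki, List.getD_eq_getElem L 0 (hki ▸ hirng)]
    · have hne : i.toNat ≠ k := by omega
      have : (L.set i.toNat (L.getD i.toNat 0 + i * S)).getD k 0 = L.getD k 0 := by
        by_cases h2 : k < L.length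
        · rw [List.getD_eq_getElem _ 0 (by simpa using h2),
              List.getElem_set_ne hne, List.getD_eq_getElem L 0 h2]
        · rw [List.getD_eq_default _ 0 (by simpa using le_of_not_gt h2),
              List.getD_eq_default _ 0 (le_of_not_gt h2)]
      rw [this]
      simp [hk]

-- Gauss: 2 * Σ_{k<m} (1+k) = m*(m+1), over Int
theorem pv_gauss (m : Nat) :
    ((List.range m).map (fun k : Nat => (1:Int) + (k:Int))).sum * 2 = (m : Int) * (m + 1) := by
  induction m with
  | zero => simp
  | succ m ih =>
    rw [List.range_succ, List.map_append, List.sum_append]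
    push_cast
    simp only [List.map_cons, List.map_nil, List.sum_cons, List.sum_nil]
    push_cast at ih ⊢
    nlinarith [ih]

-- the inner sum equals B's S (for the nonnegative n on which the lists are nonempty)
theorem pv_sum_eq (n : Int) (hn : 0 ≤ n) :
    (PySem.List.pyRange 1 n 1).sum = PySem.Int.floordiv ((n - 1) * n) 2 := by
  rw [PySem.List.pyRange_one]
  by_cases h : n ≤ 1
  · interval_cases n <;> simp [PySem.Int.floordiv]
  · have h : 1 < n := by omega
    have hg := pv_gauss (n - 1).toNat
    have hcast : ((n - 1).toNat : Int) = n - 1 := by omega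
    rw [hcast] at hg
    have h2 : (n - 1) * n = ((List.range (n - 1).toNat).map (fun k : Nat => (1:Int) + (k:Int))).sum * 2 := by
      rw [hg]; ring
    rw [h2, PySem.Int.floordiv]
    rw [Int.mul_fdiv_cancel _ (by norm_num)]

-- ===== VERDICT (by name: the statement is the Claim_ definition above) =====
theorem OperacaoMatriz_spec : Claim_equal_OperacaoMatriz := by
  intro n _
  unfold Spec_OperacaoMatriz OperacaoMatriz OperacaoMatriz_alt
  simp only [pv_while_noop]
  have hfun : (fun (acc : List Int) (i : Int) =>
      (PySem.List.pyRange 1 n 1).foldl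
        (fun acc2 j => acc2.set i.toNat (acc2.getD i.toNat 0 + i * j)) acc)
      = (fun (acc : List Int) (i : Int) =>
          acc.set i.toNat (acc.getD i.toNat 0 + i * (PySem.List.pyRange 1 n 1).sum)) := by
    funext acc i; exact pv_inner i i.toNat _ acc
  rw [hfun]
  set T := (PySem.List.pyRange 1 n 1).sum with hT
  set S := PySem.Int.floordiv ((n - 1) * n) 2 with hS
  have hlen : ((PySem.List.pyRange 1 n 1).foldl
      (fun acc i => acc.set i.toNat (acc.getD i.toNat 0 + i * T))
      (List.replicate n.toNat 0)).length = n.toNat := by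
    rw [pv_len]; simp
  have hlen2 : ((PySem.List.pyRange 0 n 1).map (fun i => i * S)).length = n.toNat := by
    simp [PySem.List.length_pyRange_one]
  apply List.ext_getElem (by rw [hlen, hlen2])
  intro k h1 h2
  have hkn : k < n.toNat := by rwa [hlen] at h1
  have hn0 : 0 ≤ n := by omega
  have hout := pv_outer T (PySem.List.pyRange 1 n 1) (PySem.List.nodup_pyRange_one 1 n)
    (fun i hi => by have := (PySem.List.mem_pyRange_one).mp hi; omega)
    (List.replicate n.toNat 0)
    (fun i hi => by
      have := (PySem.List.mem_pyRange_one).mp hi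
      simp only [List.length_replicate]; omega) k
  have hL : ((PySem.List.pyRange 1 n 1).foldl
      (fun acc i => acc.set i.toNat (acc.getD i.toNat 0 + i * T))
      (List.replicate n.toNat 0))[k] =
      ((PySem.List.pyRange 1 n 1).foldl
      (fun acc i => acc.set i.toNat (acc.getD i.toNat 0 + i * T))
      (List.replicate n.toNat 0)).getD k 0 := by
    rw [List.getD_eq_getElem _ 0 (by omega)]
  rw [hL, hout]
  have hR : ((PySem.List.pyRange 0 n 1).map (fun i => i * S))[k]
      = ((PySem.List.pyRange 0 n 1)[k]'(by simp [PySem.List.length_pyRange_one]; omega)) * S := by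
    simp
  rw [hR, PySem.List.getElem_pyRange_one]
  have hrepl : (List.replicate n.toNat (0:Int)).getD k 0 = 0 := by
    rw [List.getD_eq_getElem _ 0 (by simpa using hkn)]; simp
  rw [hrepl]
  by_cases hk : (k : Int) ∈ PySem.List.pyRange 1 n 1
  · have hTS : T = S := by rw [hT, hS]; exact pv_sum_eq n hn0
    simp [hk, hTS]
  · have hk0 : (k : Int) = 0 := by
      have := (PySem.List.mem_pyRange_one (x := (k:Int)) (a := 1) (b := n)).not.mp hk
      simp only [not_and, not_lt] at this
      omega
    simp [hk, hk0]
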